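-- pv_equiv track=rewrite | github.com/aaronmin8460/Money | app/services/ws_feed.py | canonicalize_crypto_symbol
-- ===== SOURCE A (Python) =====
-- def canonicalize_crypto_symbol(symbol: str) -> str:
--     normalized = str(symbol).strip().upper()
--     if not normalized:
--         return normalized
--     if "/" in normalized:
--         base, quote = normalized.split("/", 1)
--         return f"{base}/{quote}"
--     for suffix in ("USD", "USDT", "USDC", "BTC", "ETH"):
--         if normalized.endswith(suffix) and len(normalized) > len(suffix):
--             return f"{normalized[:-len(suffix)]}/{suffix}"
--     return normalized
-- ===== SOURCE B (Python) =====
-- QUOTES = {"USD", "USDT", "USDC", "BTC", "ETH"}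
--
--
-- def canonicalize_crypto_symbol(symbol: str) -> str:
--     s = str(symbol).strip().upper()
--     if not s or "/" in s:
--         return s
--     # scan candidate split positions left to right; a position i is a valid
--     # cut when the tail s[i:] is a known quote currency (base s[:i] nonempty);
--     # only tails of at most 4 chars can be quotes, so longer tails are skipped.
--     for i in range(1, len(s)):
--         if len(s) - i <= 4 and s[i:] in QUOTES:
--             return s[:i] + "/" + s[i:]
--     return s
-- ===== Notes on version B (the rewrite author's own statement) =====
-- stated objective: alternative
-- what changed: Instead of iterating over the fixed suffix table with endswith, B scans candidate split positions of the string left to right and cuts at the first position whose (at most 4-char) tail is in a quote-currency set (correct because the known quotes are pairwise non-suffix-overlapping, so at most one cut position can match); the slash branch, a no-op split-then-rejoin, becomes an early return.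
import Mathlib
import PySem

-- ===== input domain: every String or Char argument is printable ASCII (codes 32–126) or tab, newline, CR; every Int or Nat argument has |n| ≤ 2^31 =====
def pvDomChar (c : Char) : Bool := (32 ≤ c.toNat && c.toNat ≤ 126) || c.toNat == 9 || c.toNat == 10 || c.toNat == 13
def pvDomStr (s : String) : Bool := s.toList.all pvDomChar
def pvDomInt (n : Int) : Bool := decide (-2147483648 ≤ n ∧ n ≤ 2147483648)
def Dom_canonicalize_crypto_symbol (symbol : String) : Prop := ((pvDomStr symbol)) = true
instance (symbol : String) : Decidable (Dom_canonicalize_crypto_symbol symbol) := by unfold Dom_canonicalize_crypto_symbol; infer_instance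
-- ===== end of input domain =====

-- B replaces A's iteration over the fixed suffix table (endswith per suffix) by a left-to-right
-- scan over candidate split positions, cutting at the first position whose tail is in a
-- quote-currency set; the no-op split-then-rejoin slash branch becomes an early return (alternative).

-- ===== PORT A =====
-- the suffix 'for' loop of A, recursing over the tuple of suffixes
def pvSuffixLoopA (normalized : List Char) : List (List Char) → List Char
  | [] => normalized
  | suf :: rest =>
    if PySem.Chars.endswith normalized suf && decide (suf.length < normalized.length) then
      PySem.Chars.slice normalized none (some (-(suf.length : Int))) ++ '/' :: suf
    else pvSuffixLoopA normalized rest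

-- A's body on the normalized character list
def pvCanonACore (normalized : List Char) : String :=
  if normalized.isEmpty then String.ofList normalized
  else if PySem.Chars.isIn ['/'] normalized then
    match PySem.Chars.splitMax? normalized ['/'] 1 with
    | some (base :: quote :: _) => String.ofList (base ++ '/' :: quote)
    | _ => String.ofList normalized  -- unreachable: split with "/" present yields exactly 2 pieces
  else
    String.ofList (pvSuffixLoopA normalized
      [['U','S','D'], ['U','S','D','T'], ['U','S','D','C'], ['B','T','C'], ['E','T','H']])

def canonicalize_crypto_symbol (symbol : String) : String :=
  pvCanonACore (PySem.Chars.upper (PySem.Chars.strip symbol.toList))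

-- ===== PORT B =====
-- the module-level QUOTES set (set of strings, modelled at the char-list level)
def pvQuotes : PySem.Set (List Char) :=
  PySem.Set.ofList [['U','S','D'], ['U','S','D','T'], ['U','S','D','C'], ['B','T','C'], ['E','T','H']]

-- B's 'for i in range(1, len(s))' scan over candidate split positions
-- (tails longer than 4 chars are skipped by the length guard before slicing)
def pvPosLoopB (s : List Char) : List Int → String
  | [] => String.ofList s
  | i :: rest =>
    if decide ((s.length : Int) - i ≤ 4) && PySem.Set.contains pvQuotes (PySem.Chars.slice s (some i) none) then
      String.ofList (PySem.Chars.slice s none (some i) ++ '/' :: PySem.Chars.slice s (some i) none)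
    else pvPosLoopB s rest

-- B's body on the normalized character list
def pvCanonBCore (s : List Char) : String :=
  if s.isEmpty || PySem.Chars.isIn ['/'] s then String.ofList s
  else pvPosLoopB s (PySem.List.pyRange 1 (s.length : Int) 1)

def canonicalize_crypto_symbol_alt (symbol : String) : String :=
  pvCanonBCore (PySem.Chars.upper (PySem.Chars.strip symbol.toList))

-- ===== PRECONDITION & SPEC =====
def Spec_canonicalize_crypto_symbol (symbol : String) (out : String) : Prop := out = canonicalize_crypto_symbol_alt symbol
instance (symbol : String) (out : String) : Decidable (Spec_canonicalize_crypto_symbol symbol out) := by unfold Spec_canonicalize_crypto_symbol; infer_instance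

-- ===== CLAIM (what is proved, stated in full; the proofs are below) =====
def Claim_equal_canonicalize_crypto_symbol : Prop := ∀ (symbol : String), Dom_canonicalize_crypto_symbol symbol → Spec_canonicalize_crypto_symbol symbol (canonicalize_crypto_symbol symbol)

-- ===== LEMMAS AND PROOFS =====

-- splitOnMax.go with maxsplit exhausted returns the rest as the last piece
theorem pvGoZero (fuel : Nat) (l cur : List Char) (acc : List (List Char)) :
    PySem.Chars.splitOnMax.go ['/'] fuel 0 l cur acc = ((cur.reverse ++ l) :: acc).reverse := by
  cases fuel <;> cases l <;> simp [PySem.Chars.splitOnMax.go]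

-- splitOnMax.go with maxsplit 1 splits at the first '/'
theorem pvGoOne (l : List Char) : ∀ (fuel : Nat) (cur : List Char) (acc : List (List Char)),
    l.length < fuel →
    PySem.Chars.splitOnMax.go ['/'] fuel 1 l cur acc =
      (if '/' ∈ l
       then ((l.dropWhile (· ≠ '/')).drop 1) :: (cur.reverse ++ l.takeWhile (· ≠ '/')) :: acc
       else (cur.reverse ++ l) :: acc).reverse := by
  induction l with
  | nil =>
    intro fuel cur acc h
    cases fuel with
    | zero => omega
    | succ f => simp [PySem.Chars.splitOnMax.go]
  | cons c rest ih =>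
    intro fuel cur acc h
    cases fuel with
    | zero => omega
    | succ f =>
      by_cases hc : c = '/'
      · subst hc
        have h1 : PySem.Chars.splitOnMax.go ['/'] (f+1) 1 ('/' :: rest) cur acc =
            PySem.Chars.splitOnMax.go ['/'] f 0 rest [] (cur.reverse :: acc) := by
          simp [PySem.Chars.splitOnMax.go, List.isPrefixOf]
        rw [h1, pvGoZero]
        simp [List.dropWhile, List.takeWhile]
      · have h1 : PySem.Chars.splitOnMax.go ['/'] (f+1) 1 (c :: rest) cur acc =
            PySem.Chars.splitOnMax.go ['/'] f 1 rest (c :: cur) acc := by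
          simp [PySem.Chars.splitOnMax.go, List.isPrefixOf]
          intro hcc; exact absurd hcc.symm hc
        rw [h1, ih f (c :: cur) acc (by simpa using Nat.lt_of_succ_lt_succ h)]
        by_cases hm : '/' ∈ rest <;> simp [hm, hc, List.dropWhile, List.takeWhile, Ne.symm hc]

-- split(normalized, "/", 1) when '/' is present
theorem pvSplitOne (n : List Char) (h : '/' ∈ n) :
    PySem.Chars.splitOnMax n ['/'] 1 =
      [n.takeWhile (· ≠ '/'), (n.dropWhile (· ≠ '/')).drop 1] := by
  have : PySem.Chars.splitOnMax n ['/'] 1 =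
      PySem.Chars.splitOnMax.go ['/'] (n.length + 1) 1 n [] [] := by
    simp [PySem.Chars.splitOnMax]
  rw [this, pvGoOne n (n.length + 1) [] [] (by omega)]
  simp [h]

theorem pvDropWhileHead (n : List Char) (h : '/' ∈ n) :
    n.dropWhile (· ≠ '/') = '/' :: (n.dropWhile (· ≠ '/')).drop 1 := by
  induction n with
  | nil => simp at h
  | cons c rest ih =>
    by_cases hc : c = '/'
    · subst hc; simp [List.dropWhile]
    · have : '/' ∈ rest := by
        rcases List.mem_cons.mp h with h' | h'
        · exact absurd h'.symm hc
        · exact h'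
      simpa [List.dropWhile, hc] using ih this

theorem pvRejoin (n : List Char) (h : '/' ∈ n) :
    n.takeWhile (· ≠ '/') ++ '/' :: (n.dropWhile (· ≠ '/')).drop 1 = n := by
  conv_rhs => rw [← List.takeWhile_append_dropWhile (p := (· ≠ '/')) (l := n)]
  rw [← pvDropWhileHead n h]

-- endswith as a condition on the trailing slice
theorem pvEndsw (n w : List Char) :
    PySem.Chars.endswith n w = decide (w = n.drop (n.length - w.length)) := by
  rw [Bool.eq_iff_iff]
  simp [PySem.Chars.endswith, List.isSuffixOf_iff_suffix, List.suffix_iff_eq_drop]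

theorem pvDrop34 (n : List Char) (h : 4 ≤ n.length) :
    n.drop (n.length - 3) = (n.drop (n.length - 4)).drop 1 := by
  rw [List.drop_drop]; congr 1; omega

theorem pvIsInMem (n : List Char) : PySem.Chars.isIn ['/'] n = true ↔ '/' ∈ n := by
  rw [PySem.Chars.isIn_iff_infix]
  constructor
  · intro hi; exact hi.mem (by simp)
  · intro hm
    rcases List.mem_iff_append.mp hm with ⟨s, t, rfl⟩
    exact ⟨s, t, by simp⟩

-- the five-suffix loop of A in closed form
theorem pvLoopEq (n : List Char) :
    pvSuffixLoopA n [['U','S','D'], ['U','S','D','T'], ['U','S','D','C'], ['B','T','C'], ['E','T','H']] =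
      (if 4 < n.length ∧ (n.drop (n.length - 4) = ['U','S','D','T'] ∨ n.drop (n.length - 4) = ['U','S','D','C'])
       then n.take (n.length - 4) ++ '/' :: n.drop (n.length - 4)
       else if 3 < n.length ∧ (n.drop (n.length - 3) = ['U','S','D'] ∨ n.drop (n.length - 3) = ['B','T','C'] ∨ n.drop (n.length - 3) = ['E','T','H'])
       then n.take (n.length - 3) ++ '/' :: n.drop (n.length - 3)
       else n) := by
  simp only [pvSuffixLoopA, pvEndsw, List.length_cons, List.length_nil]
  norm_num
  rw [PySem.List.slice_to_neg_ofNat n 3 (by norm_num), PySem.List.slice_to_neg_ofNat n 4 (by norm_num)]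
  by_cases hB1 : 4 < n.length ∧ (n.drop (n.length - 4) = ['U','S','D','T'] ∨ n.drop (n.length - 4) = ['U','S','D','C'])
  · obtain ⟨h4, hor⟩ := hB1
    have h3 : n.drop (n.length - 3) = (n.drop (n.length - 4)).drop 1 := pvDrop34 n (by omega)
    have hUSD : ¬(['U','S','D'] = n.drop (n.length - 3) ∧ 3 < n.length) := by
      rintro ⟨hu, -⟩
      rw [h3] at hu
      rcases hor with h | h <;> rw [h] at hu <;> simp at hu
    rcases hor with h | h
    · rw [if_neg hUSD, if_pos ⟨h.symm, h4⟩, if_pos ⟨h4, Or.inl h⟩, h]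
    · have hUSDT : ¬(['U','S','D','T'] = n.drop (n.length - 4) ∧ 4 < n.length) := by
        rintro ⟨hu, -⟩; rw [h] at hu; simp at hu
      rw [if_neg hUSD, if_neg hUSDT, if_pos ⟨h.symm, h4⟩, if_pos ⟨h4, Or.inr h⟩, h]
  · rw [if_neg hB1]
    push Not at hB1
    by_cases hB2 : 3 < n.length ∧ (n.drop (n.length - 3) = ['U','S','D'] ∨ n.drop (n.length - 3) = ['B','T','C'] ∨ n.drop (n.length - 3) = ['E','T','H'])
    · obtain ⟨h3l, hor⟩ := hB2
      have hUSDT : ¬(['U','S','D','T'] = n.drop (n.length - 4) ∧ 4 < n.length) := by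
        rintro ⟨hu, h4⟩; exact (hB1 h4).1 hu.symm
      have hUSDC : ¬(['U','S','D','C'] = n.drop (n.length - 4) ∧ 4 < n.length) := by
        rintro ⟨hu, h4⟩; exact (hB1 h4).2 hu.symm
      have hpos : 3 < n.length ∧ (n.drop (n.length - 3) = ['U','S','D'] ∨ n.drop (n.length - 3) = ['B','T','C'] ∨ n.drop (n.length - 3) = ['E','T','H']) := ⟨h3l, hor⟩
      rcases hor with h | h | h
      · rw [if_pos ⟨h.symm, h3l⟩, if_pos hpos, h]
      · have hUSD : ¬(['U','S','D'] = n.drop (n.length - 3) ∧ 3 < n.length) := by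
          rintro ⟨hu, -⟩; rw [h] at hu; simp at hu
        rw [if_neg hUSD, if_neg hUSDT, if_neg hUSDC, if_pos ⟨h.symm, h3l⟩, if_pos hpos, h]
      · have hUSD : ¬(['U','S','D'] = n.drop (n.length - 3) ∧ 3 < n.length) := by
          rintro ⟨hu, -⟩; rw [h] at hu; simp at hu
        have hBTC : ¬(['B','T','C'] = n.drop (n.length - 3) ∧ 3 < n.length) := by
          rintro ⟨hu, -⟩; rw [h] at hu; simp at hu
        rw [if_neg hUSD, if_neg hUSDT, if_neg hUSDC, if_neg hBTC, if_pos ⟨h.symm, h3l⟩, if_pos hpos, h]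
    · rw [if_neg hB2]
      push Not at hB2
      have hUSD : ¬(['U','S','D'] = n.drop (n.length - 3) ∧ 3 < n.length) := by
        rintro ⟨hu, hl⟩; exact (hB2 hl).1 hu.symm
      have hUSDT : ¬(['U','S','D','T'] = n.drop (n.length - 4) ∧ 4 < n.length) := by
        rintro ⟨hu, h4⟩; exact (hB1 h4).1 hu.symm
      have hUSDC : ¬(['U','S','D','C'] = n.drop (n.length - 4) ∧ 4 < n.length) := by
        rintro ⟨hu, h4⟩; exact (hB1 h4).2 hu.symm
      have hBTC : ¬(['B','T','C'] = n.drop (n.length - 3) ∧ 3 < n.length) := by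
        rintro ⟨hu, hl⟩; exact (hB2 hl).2.1 hu.symm
      have hETH : ¬(['E','T','H'] = n.drop (n.length - 3) ∧ 3 < n.length) := by
        rintro ⟨hu, hl⟩; exact (hB2 hl).2.2 hu.symm
      rw [if_neg hUSD, if_neg hUSDT, if_neg hUSDC, if_neg hBTC, if_neg hETH]

-- membership in the QUOTES set, spelled out
theorem pvQuotesMem (t : List Char) :
    PySem.Set.contains pvQuotes t = true ↔
      t = ['U','S','D'] ∨ t = ['U','S','D','T'] ∨ t = ['U','S','D','C'] ∨
      t = ['B','T','C'] ∨ t = ['E','T','H'] := by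
  rw [PySem.Set.contains_iff]
  simp [pvQuotes, PySem.Set.mem_ofList]

-- a tail s.drop j can be in QUOTES only when its length is 3 or 4
theorem pvHitIff (s : List Char) (j : Nat) (hj : j ≤ s.length) :
    PySem.Set.contains pvQuotes (s.drop j) = true ↔
      (s.length = j + 4 ∧ (s.drop j = ['U','S','D','T'] ∨ s.drop j = ['U','S','D','C'])) ∨
      (s.length = j + 3 ∧ (s.drop j = ['U','S','D'] ∨ s.drop j = ['B','T','C'] ∨ s.drop j = ['E','T','H'])) := by
  rw [pvQuotesMem]
  have hlen : (s.drop j).length = s.length - j := by simp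
  constructor
  · rintro (h | h | h | h | h) <;>
      · first
        | exact Or.inr ⟨by rw [h] at hlen; simp at hlen; omega, by tauto⟩
        | exact Or.inl ⟨by rw [h] at hlen; simp at hlen; omega, by tauto⟩
  · rintro (⟨-, h | h⟩ | ⟨-, h | h | h⟩) <;> tauto

-- B's position loop skips a block of positions with no matching tail
theorem pvLoopB_skip (s : List Char) (l r : List Int)
    (h : ∀ i ∈ l, PySem.Set.contains pvQuotes (PySem.Chars.slice s (some i) none) = false) :
    pvPosLoopB s (l ++ r) = pvPosLoopB s r := by
  induction l with
  | nil => rfl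
  | cons i rest ih =>
    simp only [List.cons_append, pvPosLoopB, h i (by simp), Bool.and_false, Bool.false_eq_true,
      if_false]
    exact ih (fun k hk => h k (by simp [hk]))

-- B's position loop over range(1, len(s)) in the same closed form as A's suffix loop
theorem pvPosLoopEq (s : List Char) :
    pvPosLoopB s (PySem.List.pyRange 1 (s.length : Int) 1) =
      String.ofList
      (if 4 < s.length ∧ (s.drop (s.length - 4) = ['U','S','D','T'] ∨ s.drop (s.length - 4) = ['U','S','D','C'])
       then s.take (s.length - 4) ++ '/' :: s.drop (s.length - 4)
       else if 3 < s.length ∧ (s.drop (s.length - 3) = ['U','S','D'] ∨ s.drop (s.length - 3) = ['B','T','C'] ∨ s.drop (s.length - 3) = ['E','T','H'])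
       then s.take (s.length - 3) ++ '/' :: s.drop (s.length - 3)
       else s) := by
  have hslice : ∀ i : Int, 0 ≤ i →
      PySem.Chars.slice s (some i) none = s.drop i.toNat := by
    intro i hi
    simpa using PySem.List.slice_from s hi
  by_cases hB1 : 4 < s.length ∧ (s.drop (s.length - 4) = ['U','S','D','T'] ∨ s.drop (s.length - 4) = ['U','S','D','C'])
  · obtain ⟨h4, hor⟩ := hB1
    have htn : ((s.length : Int) - 4).toNat = s.length - 4 := by omega
    have hto : PySem.Chars.slice s none (some ((s.length : Int) - 4)) = s.take (s.length - 4) := by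
      have := PySem.List.slice_to s (b := (s.length : Int) - 4) (by omega)
      rw [htn] at this
      simpa using this
    rw [PySem.List.pyRange_one_append 1 ((s.length : Int) - 4) (s.length : Int) (by omega) (by omega),
        PySem.List.pyRange_one_cons (a := (s.length : Int) - 4) (b := (s.length : Int)) (by omega),
        pvLoopB_skip]
    · have hcond : (decide ((s.length : Int) - ((s.length : Int) - 4) ≤ 4) &&
          PySem.Set.contains pvQuotes (s.drop (s.length - 4))) = true := by
        simp only [Bool.and_eq_true, decide_eq_true_eq]
        exact ⟨by omega, (pvQuotesMem _).mpr (by tauto)⟩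
      simp only [pvPosLoopB, hslice _ (show (0 : Int) ≤ (s.length : Int) - 4 by omega), htn,
        hcond, if_true, hto]
      rw [if_pos ⟨h4, hor⟩]
    · intro i hi
      have hir := (PySem.List.mem_pyRange_one).mp hi
      rw [hslice i (by omega)]
      rw [Bool.eq_false_iff]
      intro hc
      rcases (pvHitIff s i.toNat (by omega)).mp hc with ⟨hl, -⟩ | ⟨hl, -⟩ <;> omega
  · by_cases hB2 : 3 < s.length ∧ (s.drop (s.length - 3) = ['U','S','D'] ∨ s.drop (s.length - 3) = ['B','T','C'] ∨ s.drop (s.length - 3) = ['E','T','H'])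
    · obtain ⟨h3, hor⟩ := hB2
      have htn : ((s.length : Int) - 3).toNat = s.length - 3 := by omega
      have hto : PySem.Chars.slice s none (some ((s.length : Int) - 3)) = s.take (s.length - 3) := by
        have := PySem.List.slice_to s (b := (s.length : Int) - 3) (by omega)
        rw [htn] at this
        simpa using this
      rw [PySem.List.pyRange_one_append 1 ((s.length : Int) - 3) (s.length : Int) (by omega) (by omega),
          PySem.List.pyRange_one_cons (a := (s.length : Int) - 3) (b := (s.length : Int)) (by omega),
          pvLoopB_skip]
      · have hcond : (decide ((s.length : Int) - ((s.length : Int) - 3) ≤ 4) &&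
            PySem.Set.contains pvQuotes (s.drop (s.length - 3))) = true := by
          simp only [Bool.and_eq_true, decide_eq_true_eq]
          exact ⟨by omega, (pvQuotesMem _).mpr (by tauto)⟩
        simp only [pvPosLoopB, hslice _ (show (0 : Int) ≤ (s.length : Int) - 3 by omega), htn,
          hcond, if_true, hto]
        rw [if_neg hB1, if_pos ⟨h3, hor⟩]
      · intro i hi
        have hir := (PySem.List.mem_pyRange_one).mp hi
        rw [hslice i (by omega)]
        rw [Bool.eq_false_iff]
        intro hc
        rcases (pvHitIff s i.toNat (by omega)).mp hc with ⟨hl, hq⟩ | ⟨hl, -⟩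
        · have hji : i.toNat = s.length - 4 := by omega
          exact hB1 ⟨by omega, by rw [← hji]; exact hq⟩
        · omega
    · rw [show PySem.List.pyRange 1 (s.length : Int) 1 =
            PySem.List.pyRange 1 (s.length : Int) 1 ++ [] from (List.append_nil _).symm,
          pvLoopB_skip, if_neg hB1, if_neg hB2]
      · rfl
      · intro i hi
        have hir := (PySem.List.mem_pyRange_one).mp hi
        rw [hslice i (by omega)]
        rw [Bool.eq_false_iff]
        intro hc
        rcases (pvHitIff s i.toNat (by omega)).mp hc with ⟨hl, hq⟩ | ⟨hl, hq⟩
        · have hji : i.toNat = s.length - 4 := by omega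
          exact hB1 ⟨by omega, by rw [← hji]; exact hq⟩
        · have hji : i.toNat = s.length - 3 := by omega
          exact hB2 ⟨by omega, by rw [← hji]; exact hq⟩

-- A's body = B's body on any character list
theorem pvCoreEq (n : List Char) : pvCanonACore n = pvCanonBCore n := by
  unfold pvCanonACore pvCanonBCore
  by_cases he : n.isEmpty
  · simp [he]
  · have hef : n.isEmpty = false := by simpa using he
    by_cases hin : PySem.Chars.isIn ['/'] n = true
    · have hm := (pvIsInMem n).mp hin
      simp only [hef, hin, Bool.or_true, Bool.false_eq_true, if_false, if_true,
        PySem.Chars.splitMax?]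
      rw [show (if (['/'] : List Char).isEmpty = true then none
            else some (PySem.Chars.splitOnMax n ['/'] 1)) =
          some (PySem.Chars.splitOnMax n ['/'] 1) from rfl, pvSplitOne n hm]
      exact congrArg String.ofList (pvRejoin n hm)
    · have hinf : PySem.Chars.isIn ['/'] n = false := by simpa using hin
      simp only [hef, hinf, Bool.or_self, Bool.false_eq_true, if_false]
      rw [pvLoopEq, pvPosLoopEq]

-- ===== VERDICT (by name: the statement is the Claim_ definition above) =====
theorem canonicalize_crypto_symbol_spec : Claim_equal_canonicalize_crypto_symbol := by
  intro symbol _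
  unfold Spec_canonicalize_crypto_symbol canonicalize_crypto_symbol canonicalize_crypto_symbol_alt
  exact pvCoreEq _
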